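-- pv_equiv track=rewrite | github.com/Suama724/PICAS_Re | src/data_layer/disk_index.py | _intersect_groups
-- ===== SOURCE A (Python) =====
-- from collections.abc import Callable, Iterable
-- from typing import BinaryIO, TypeVar
--
-- T = TypeVar("T")
--
-- def _intersect_groups(groups: Iterable[Iterable[T]]) -> list[T]:
--     matched_groups = [set(group) for group in groups]
--     if not matched_groups:
--         return []
--
--     matched = matched_groups[0]
--     for group in matched_groups[1:]:
--         matched &= group
--         if not matched:
--             return []
--     return sorted(matched)
-- ===== SOURCE B (Python) =====
-- def _intersect_groups(groups):
--     counts = {}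
--     n = 0
--     for group in groups:
--         n += 1
--         for x in set(group):
--             counts[x] = counts.get(x, 0) + 1
--     if n == 0:
--         return []
--     return sorted(x for x, c in counts.items() if c == n)
-- ===== Notes on version B (the rewrite author's own statement) =====
-- stated objective: alternative
-- what changed: Replaces iterative pairwise set-intersection with a single tally pass: a dict counts in how many groups each element occurs (each group dedupped first), and the result is the sorted list of elements whose tally equals the number of groups.
import Mathlib
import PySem

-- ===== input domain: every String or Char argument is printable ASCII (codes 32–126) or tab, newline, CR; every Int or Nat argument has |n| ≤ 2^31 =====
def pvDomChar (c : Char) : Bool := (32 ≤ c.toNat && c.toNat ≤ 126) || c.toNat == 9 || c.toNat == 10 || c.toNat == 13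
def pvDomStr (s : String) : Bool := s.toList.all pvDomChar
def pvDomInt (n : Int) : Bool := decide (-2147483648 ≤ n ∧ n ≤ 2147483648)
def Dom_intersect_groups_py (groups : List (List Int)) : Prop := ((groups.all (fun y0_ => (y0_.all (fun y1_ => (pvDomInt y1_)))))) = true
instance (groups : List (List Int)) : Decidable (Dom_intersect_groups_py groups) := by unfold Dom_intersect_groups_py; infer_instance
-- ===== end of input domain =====

-- B replaces A's iterative pairwise set-intersection with one tally pass counting, per element,
-- how many groups contain it (objective: alternative, same cost).

-- ===== PORT A =====
-- the 'for group in matched_groups[1:]' loop with its early return on empty intersection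
def pvInterLoopA (matched : PySem.Set Int) (rest : List (PySem.Set Int)) : List Int :=
  match rest with
  | [] => PySem.List.sorted matched (fun x => x) false
  | g :: gs =>
      let m := PySem.Set.inter matched g
      if m = [] then [] else pvInterLoopA m gs

def intersect_groups_py (groups : List (List Int)) : List Int :=
  let matched_groups := groups.map (fun g => PySem.Set.ofList g)
  match matched_groups with
  | [] => []
  | m :: rest => pvInterLoopA m rest

-- ===== PORT B =====
def intersect_groups_py_alt (groups : List (List Int)) : List Int :=
  let st := groups.foldl
      (fun (st : PySem.Dict Int Int × Int) group =>
        ((PySem.Set.ofList group).foldl (fun d x => d.modify x 0 (· + 1)) st.1, st.2 + 1))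
      (PySem.Dict.empty, 0)
  if st.2 = 0 then []
  else PySem.List.sorted ((st.1.items.filter (fun kv => kv.2 = st.2)).map Prod.fst) (fun x => x) false

-- ===== PRECONDITION & SPEC =====
def Spec_intersect_groups_py (groups : List (List Int)) (out : List Int) : Prop := out = intersect_groups_py_alt groups
instance (groups : List (List Int)) (out : List Int) : Decidable (Spec_intersect_groups_py groups out) := by unfold Spec_intersect_groups_py; infer_instance

-- ===== CLAIM (what is proved, stated in full; the proofs are below) =====
def Claim_equal_intersect_groups_py : Prop := ∀ (groups : List (List Int)), Dom_intersect_groups_py groups → Spec_intersect_groups_py groups (intersect_groups_py groups)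

-- ===== LEMMAS AND PROOFS =====

-- sorting is determined by the multiset of elements; for nodup lists, by the set
theorem pv_sorted_eq_of_perm {l1 l2 : List Int} (hp : l1.Perm l2) (hnd : l1.Nodup) :
    PySem.List.sorted l1 (fun x => x) false = PySem.List.sorted l2 (fun x => x) false := by
  have hys := PySem.List.sorted_perm l2 (fun x : Int => x) false
  have hperm1 : (PySem.List.sorted l2 (fun x => x) false).Perm l1 := hys.trans hp.symm
  have hnd2 : (PySem.List.sorted l2 (fun x => x) false).Nodup := hperm1.nodup_iff.mpr hnd
  have hle : (PySem.List.sorted l2 (fun x => x) false).Pairwise (fun a b => a ≤ b) :=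
    PySem.List.sorted_pairwise l2 (fun x : Int => x)
  have hlt : (PySem.List.sorted l2 (fun x => x) false).Pairwise (fun a b : Int => a < b) := by
    have := hle.and hnd2
    exact this.imp (fun h => lt_of_le_of_ne h.1 h.2)
  exact PySem.List.sorted_eq_of_perm_of_pairwise_lt _ _ _ hperm1 hlt

theorem pv_foldl_inter_nil (gs : List (PySem.Set Int)) :
    gs.foldl PySem.Set.inter ([] : PySem.Set Int) = [] := by
  induction gs with
  | nil => rfl
  | cons g gs ih => simpa [PySem.Set.inter] using ih

theorem pv_interLoopA_eq (rest : List (PySem.Set Int)) (m : PySem.Set Int) :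
    pvInterLoopA m rest = PySem.List.sorted (rest.foldl PySem.Set.inter m) (fun x => x) false := by
  induction rest generalizing m with
  | nil => rfl
  | cons g gs ih =>
      simp only [pvInterLoopA, List.foldl_cons]
      split_ifs with h
      · rw [h, pv_foldl_inter_nil]; rfl
      · exact ih _

theorem pv_mem_foldl_inter (gs : List (PySem.Set Int)) (m : PySem.Set Int) (x : Int) :
    x ∈ gs.foldl PySem.Set.inter m ↔ x ∈ m ∧ ∀ g ∈ gs, x ∈ g := by
  induction gs generalizing m with
  | nil => simp
  | cons g gs ih =>
      simp [ih, PySem.Set.mem_inter, and_assoc]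

theorem pv_nodup_foldl_inter (gs : List (PySem.Set Int)) (m : PySem.Set Int) (hnd : m.Nodup) :
    (gs.foldl PySem.Set.inter m).Nodup := by
  induction gs generalizing m with
  | nil => exact hnd
  | cons g gs ih => exact ih _ (PySem.Set.nodup_inter _ _ hnd)

-- B's fold: second component counts the groups, first tallies the dedupped elements
theorem pv_foldB_eq (groups : List (List Int)) (d : PySem.Dict Int Int) (k : Int) :
    groups.foldl
      (fun (st : PySem.Dict Int Int × Int) group =>
        ((PySem.Set.ofList group).foldl (fun d x => d.modify x 0 (· + 1)) st.1, st.2 + 1))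
      (d, k)
    = (groups.foldl (fun d group => (PySem.Set.ofList group).foldl (fun d x => d.modify x 0 (· + 1)) d) d,
       k + groups.length) := by
  induction groups generalizing d k with
  | nil => simp
  | cons g gs ih => simp [ih]; omega

theorem pv_getD_tally (groups : List (List Int)) (d : PySem.Dict Int Int) (v : Int) :
    (groups.foldl (fun d group => (PySem.Set.ofList group).foldl (fun d x => d.modify x 0 (· + 1)) d) d).getD v 0
      = d.getD v 0 + (groups.countP (fun g => decide (v ∈ g)) : Int) := by
  induction groups generalizing d with
  | nil => simp
  | cons g gs ih =>
      rw [List.foldl_cons, ih, PySem.Dict.getD_foldl_modify_add_one]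
      have hcnt : (PySem.Set.ofList g).count v = if v ∈ g then 1 else 0 := by
        by_cases h : v ∈ g
        · simp [h]
        · simp [h, List.count_eq_zero_of_not_mem (fun hc => h ((PySem.Set.mem_ofList g v).mp hc))]
      rw [hcnt, List.countP_cons]
      by_cases h : v ∈ g
      · simp [h]; ring
      · simp [h]

theorem pv_keys_tally (groups : List (List Int)) (d : PySem.Dict Int Int) :
    (groups.foldl (fun d group => (PySem.Set.ofList group).foldl (fun d x => d.modify x 0 (· + 1)) d) d).keys
      = groups.foldl (fun s group => PySem.Set.update s (PySem.Set.ofList group)) d.keys := by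
  induction groups generalizing d with
  | nil => rfl
  | cons g gs ih =>
      simp only [List.foldl_cons]
      rw [ih, PySem.Dict.keys_foldl_modify _ _ (fun _ _ v => v + 1)]

theorem pv_nodup_keys_tally (groups : List (List Int)) :
    (groups.foldl (fun d group => (PySem.Set.ofList group).foldl (fun d x => d.modify x 0 (· + 1)) d)
      (PySem.Dict.empty : PySem.Dict Int Int)).keys.Nodup := by
  rw [pv_keys_tally]
  have : ∀ (gs : List (List Int)) (s : PySem.Set Int), s.Nodup →
      (gs.foldl (fun s group => PySem.Set.update s (PySem.Set.ofList group)) s).Nodup := by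
    intro gs
    induction gs with
    | nil => exact fun s h => h
    | cons g gs ih => exact fun s h => ih _ (PySem.Set.nodup_update _ _ h)
  exact this groups _ (by simp [PySem.Dict.keys, PySem.Dict.empty])

-- membership in B's pre-sort list, for nonempty groups
theorem pv_mem_B_list (groups : List (List Int)) (x : Int) (hne : groups ≠ []) :
    (x ∈ (((groups.foldl (fun d group => (PySem.Set.ofList group).foldl (fun d x => d.modify x 0 (· + 1)) d)
          (PySem.Dict.empty : PySem.Dict Int Int)).items.filter
            (fun kv => kv.2 = (groups.length : Int))).map Prod.fst))
      ↔ ∀ g ∈ groups, x ∈ g := by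
  set d := groups.foldl (fun d group => (PySem.Set.ofList group).foldl (fun d x => d.modify x 0 (· + 1)) d)
      (PySem.Dict.empty : PySem.Dict Int Int) with hd
  have hnd : d.keys.Nodup := pv_nodup_keys_tally groups
  have htall : d.getD x 0 = (groups.countP (fun g => decide (x ∈ g)) : Int) := by
    have := pv_getD_tally groups PySem.Dict.empty x
    rw [← hd] at this
    simpa using this
  constructor
  · rintro hx
    simp only [List.mem_map, List.mem_filter] at hx
    obtain ⟨⟨k, c⟩, ⟨hmem, hc⟩, rfl⟩ := hx
    have hg : d.getD k 0 = c := PySem.Dict.getD_of_mem_items _ hmem hnd 0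
    have hc' : c = (groups.length : Int) := by simpa using hc
    have hcount : groups.countP (fun g => decide (k ∈ g)) = groups.length := by
      have : (groups.countP (fun g => decide (k ∈ g)) : Int) = (groups.length : Int) := by
        rw [← htall, hg, hc']
      exact_mod_cast this
    intro g hgmem
    simpa using List.countP_eq_length.mp hcount g hgmem
  · intro hall
    have hcount : groups.countP (fun g => decide (x ∈ g)) = groups.length :=
      List.countP_eq_length.mpr (fun g hg => by simpa using hall g hg)
    have hg : d.getD x 0 = (groups.length : Int) := by rw [htall, hcount]
    have hxk : x ∈ d.keys := by
      by_contra hxk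
      have h0 : d.getD x 0 = 0 := PySem.Dict.getD_of_not_contains d 0 (by
        cases hcon : d.contains x with
        | false => rfl
        | true => exact absurd ((PySem.Dict.contains_iff_mem_keys _ _).mp hcon) hxk)
      rw [h0] at hg
      have : groups.length = 0 := by exact_mod_cast hg.symm
      exact hne (List.length_eq_zero_iff.mp this)
    have hget : d.get? x = some ((groups.length : Int)) := by
      rcases Option.eq_none_or_eq_some (d.get? x) with h | ⟨c, h⟩
      · exact absurd ((PySem.Dict.get?_eq_none_iff_not_mem_keys _ _).mp h) (by simpa using hxk)
      · rw [h]
        have heq := PySem.Dict.getD_eq_get?_getD d x (0 : Int)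
        rw [h] at heq
        simp only [Option.getD_some] at heq
        rw [← heq, hg]
    have hitems : (x, (groups.length : Int)) ∈ d.items := PySem.Dict.mem_items_of_get?_eq_some d hget
    simp only [List.mem_map, List.mem_filter]
    exact ⟨(x, (groups.length : Int)), ⟨hitems, by simp⟩, rfl⟩

theorem pv_nodup_B_list (groups : List (List Int)) :
    ((((groups.foldl (fun d group => (PySem.Set.ofList group).foldl (fun d x => d.modify x 0 (· + 1)) d)
          (PySem.Dict.empty : PySem.Dict Int Int)).items.filter
            (fun kv => kv.2 = (groups.length : Int))).map Prod.fst)).Nodup := by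
  set d := groups.foldl (fun d group => (PySem.Set.ofList group).foldl (fun d x => d.modify x 0 (· + 1)) d)
      (PySem.Dict.empty : PySem.Dict Int Int) with hd
  have hnd : d.keys.Nodup := pv_nodup_keys_tally groups
  have hsub : ((d.items.filter (fun kv => kv.2 = (groups.length : Int))).map Prod.fst).Sublist d.keys := by
    have := (List.filter_sublist (l := d.items) (p := fun kv => decide (kv.2 = (groups.length : Int)))).map Prod.fst
    simpa [PySem.Dict.keys] using this
  exact hnd.sublist hsub

-- ===== VERDICT (by name: the statement is the Claim_ definition above) =====
theorem intersect_groups_py_spec : Claim_equal_intersect_groups_py := by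
  intro groups _
  unfold Spec_intersect_groups_py intersect_groups_py intersect_groups_py_alt
  cases groups with
  | nil => rfl
  | cons g gs =>
      simp only [List.map_cons, pv_interLoopA_eq, pv_foldB_eq, zero_add, List.length_cons]
      rw [if_neg (by push_cast; omega)]
      apply pv_sorted_eq_of_perm
      · apply (List.perm_ext_iff_of_nodup (pv_nodup_foldl_inter _ _ (PySem.Set.nodup_ofList g))
          (pv_nodup_B_list (g :: gs))).mpr
        intro x
        rw [pv_mem_foldl_inter, pv_mem_B_list (g :: gs) x (by simp)]
        constructor
        · rintro ⟨hx, hrest⟩ g' hg'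
          rcases List.mem_cons.mp hg' with rfl | hg'
          · exact (PySem.Set.mem_ofList _ _).mp hx
          · exact (PySem.Set.mem_ofList _ _).mp (hrest _ (List.mem_map_of_mem hg'))
        · intro hall
          refine ⟨(PySem.Set.mem_ofList _ _).mpr (hall g (by simp)), ?_⟩
          intro s hs
          rcases List.mem_map.mp hs with ⟨g', hg', rfl⟩
          exact (PySem.Set.mem_ofList _ _).mpr (hall g' (by simp [hg']))
      · exact pv_nodup_foldl_inter _ _ (PySem.Set.nodup_ofList g)
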